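-- pv_equiv track=rewrite | github.com/josephsenior/intelligent-task-automation-agent | backend/agents/executor_agent.py | _infer_tool
-- ===== SOURCE A (Python) =====
-- from typing import Any, Dict, Optional
--
-- def _infer_tool(task_description: str) -> Optional[str]:
--     """
--     Infer which tool to use from task description.
--
--     Args:
--         task_description: Description of the task
--
--     Returns:
--         Tool name or None
--     """
--     description_lower = task_description.lower()
--
--     # Simple keyword-based inference
--     if any(
--         keyword in description_lower
--         for keyword in ["file", "create file", "read file", "write", "directory"]
--     ):
--         return "file_operations"
--     elif any(
--         keyword in description_lower
--         for keyword in ["git", "commit", "branch", "repository"]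
--     ):
--         return "git_operations"
--     elif any(
--         keyword in description_lower
--         for keyword in ["download", "fetch", "request", "http", "url"]
--     ):
--         return "web_operations"
--     elif any(
--         keyword in description_lower
--         for keyword in ["run", "execute", "command", "install", "python", "npm"]
--     ):
--         return "command_executor"
--
--     return None
-- ===== SOURCE B (Python) =====
-- from typing import Any, Dict, Optional
--
-- # Flat keyword -> priority index; no groups, no ordered scan of rules.
-- _KEYWORD_PRIORITY = {
--     "file": 0, "create file": 0, "read file": 0, "write": 0, "directory": 0,
--     "git": 1, "commit": 1, "branch": 1, "repository": 1,
--     "download": 2, "fetch": 2, "request": 2, "http": 2, "url": 2,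
--     "run": 3, "execute": 3, "command": 3, "install": 3, "python": 3, "npm": 3,
-- }
-- _TOOLS = ["file_operations", "git_operations", "web_operations", "command_executor"]
--
-- def _infer_tool(task_description: str) -> Optional[str]:
--     d = task_description.lower()
--     best = min((p for k, p in _KEYWORD_PRIORITY.items() if k in d), default=None)
--     return _TOOLS[best] if best is not None else None
-- ===== Notes on version B (the rewrite author's own statement) =====
-- stated objective: alternative
-- what changed: Replaces the ordered if/elif group scan with a flat keyword->priority index: every matching keyword contributes its priority independently and the answer is the tool at the minimum matched priority (min aggregation instead of first-match control flow).
import Mathlib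
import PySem

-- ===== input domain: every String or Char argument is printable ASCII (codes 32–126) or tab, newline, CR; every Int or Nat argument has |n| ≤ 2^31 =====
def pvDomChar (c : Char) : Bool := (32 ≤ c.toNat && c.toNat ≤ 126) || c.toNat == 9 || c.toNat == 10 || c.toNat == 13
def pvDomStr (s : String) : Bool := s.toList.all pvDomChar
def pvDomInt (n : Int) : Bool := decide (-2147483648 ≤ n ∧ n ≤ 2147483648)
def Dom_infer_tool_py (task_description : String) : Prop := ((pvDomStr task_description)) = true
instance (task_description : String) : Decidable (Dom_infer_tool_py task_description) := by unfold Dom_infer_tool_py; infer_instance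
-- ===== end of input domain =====

-- B replaces A's ordered if/elif group scan by a flat keyword->priority index aggregated with min (alternative decomposition, same behaviour).
-- ===== PORT A =====
def infer_tool_py (task_description : String) : Option String :=
  let description_lower := PySem.Str.lower task_description
  if (["file", "create file", "read file", "write", "directory"].any
      (fun keyword => PySem.Str.isIn keyword description_lower)) then
    some "file_operations"
  else if (["git", "commit", "branch", "repository"].any
      (fun keyword => PySem.Str.isIn keyword description_lower)) then
    some "git_operations"
  else if (["download", "fetch", "request", "http", "url"].any
      (fun keyword => PySem.Str.isIn keyword description_lower)) then
    some "web_operations"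
  else if (["run", "execute", "command", "install", "python", "npm"].any
      (fun keyword => PySem.Str.isIn keyword description_lower)) then
    some "command_executor"
  else
    none

-- ===== PORT B =====
-- flat keyword -> priority index (port of Source B's _KEYWORD_PRIORITY, insertion order)
def pvKeywordPriority : List (String × Nat) :=
  [("file", 0), ("create file", 0), ("read file", 0), ("write", 0), ("directory", 0),
   ("git", 1), ("commit", 1), ("branch", 1), ("repository", 1),
   ("download", 2), ("fetch", 2), ("request", 2), ("http", 2), ("url", 2),
   ("run", 3), ("execute", 3), ("command", 3), ("install", 3), ("python", 3), ("npm", 3)]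

def pvTools : List String :=
  ["file_operations", "git_operations", "web_operations", "command_executor"]

-- Python's min(gen, default=None): left-to-right fold keeping the running minimum
def infer_tool_py_alt (task_description : String) : Option String :=
  let d := PySem.Str.lower task_description
  let best : Option Nat :=
    (pvKeywordPriority.filter (fun kp => PySem.Str.isIn kp.1 d)).foldl
      (fun acc kp => match acc with
        | none => some kp.2
        | some m => some (min m kp.2)) none
  match best with
  | none => none
  | some p => PySem.List.pyGet? pvTools (p : Int)  -- _TOOLS[best]; best is always 0..3 here

-- ===== PRECONDITION & SPEC =====
def Spec_infer_tool_py (task_description : String) (out : Option String) : Prop := out = infer_tool_py_alt task_description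
instance (task_description : String) (out : Option String) : Decidable (Spec_infer_tool_py task_description out) := by unfold Spec_infer_tool_py; infer_instance

-- ===== CLAIM (what is proved, stated in full; the proofs are below) =====
def Claim_equal_infer_tool_py : Prop := ∀ (task_description : String), Dom_infer_tool_py task_description → Spec_infer_tool_py task_description (infer_tool_py task_description)

-- ===== LEMMAS AND PROOFS =====

def pvStep : Option Nat → String × Nat → Option Nat :=
  fun acc kp => match acc with
    | none => some kp.2
    | some m => some (min m kp.2)

-- folding pvStep over one constant-priority block: the result only depends on whether any keyword matched
theorem pvFold_block (q : String → Bool) (c : Nat) (ks : List String) (acc : Option Nat) :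
    ((ks.map (fun k => (k, c))).filter (fun kp => q kp.1)).foldl pvStep acc
      = if ks.any q then (match acc with | none => some c | some m => some (min m c)) else acc := by
  induction ks generalizing acc with
  | nil => simp
  | cons k ks ih =>
    simp only [List.map_cons, List.filter_cons, List.any_cons]
    by_cases h : q k = true
    · simp only [h, if_true, List.foldl_cons, Bool.true_or]
      cases acc <;> rw [ih] <;> split <;>
        simp only [pvStep, Option.some.injEq] <;> omega
    · rw [if_neg (by simp [h]), ih]
      simp [h]

theorem pvKeywordPriority_blocks :
    pvKeywordPriority =
      (["file", "create file", "read file", "write", "directory"].map (fun k => (k, 0)))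
      ++ (["git", "commit", "branch", "repository"].map (fun k => (k, 1)))
      ++ (["download", "fetch", "request", "http", "url"].map (fun k => (k, 2)))
      ++ (["run", "execute", "command", "install", "python", "npm"].map (fun k => (k, 3))) := by
  rfl

-- ===== VERDICT (by name: the statement is the Claim_ definition above) =====
theorem infer_tool_py_spec : Claim_equal_infer_tool_py := by
  intro s _
  unfold Spec_infer_tool_py infer_tool_py infer_tool_py_alt
  rw [pvKeywordPriority_blocks]
  simp only [List.filter_append, List.foldl_append]
  rw [show (fun acc (kp : String × Nat) => match acc with
        | none => some kp.2
        | some m => some (min m kp.2)) = pvStep from rfl]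
  rw [pvFold_block (fun k => PySem.Str.isIn k (PySem.Str.lower s)),
      pvFold_block (fun k => PySem.Str.isIn k (PySem.Str.lower s)),
      pvFold_block (fun k => PySem.Str.isIn k (PySem.Str.lower s)),
      pvFold_block (fun k => PySem.Str.isIn k (PySem.Str.lower s))]
  generalize (["file", "create file", "read file", "write", "directory"].any
      (fun keyword => PySem.Str.isIn keyword (PySem.Str.lower s))) = b0
  generalize (["git", "commit", "branch", "repository"].any
      (fun keyword => PySem.Str.isIn keyword (PySem.Str.lower s))) = b1
  generalize (["download", "fetch", "request", "http", "url"].any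
      (fun keyword => PySem.Str.isIn keyword (PySem.Str.lower s))) = b2
  generalize (["run", "execute", "command", "install", "python", "npm"].any
      (fun keyword => PySem.Str.isIn keyword (PySem.Str.lower s))) = b3
  cases b0 <;> cases b1 <;> cases b2 <;> cases b3 <;> simp <;> decide
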